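-- pv_equiv track=rewrite | github.com/DeniedWorks/synty-godot-converter | converter.py | _parse_shader_globals
-- ===== SOURCE A (Python) =====
-- def _parse_shader_globals(section: str) -> dict[str, str]:
--     """Parse shader globals section into a dict of uniform_name -> full definition.
--
--     Args:
--         section: The [shader_globals] section content (including or excluding header).
--
--     Returns:
--         Dictionary mapping uniform names to their full definition strings.
--     """
--     uniforms: dict[str, str] = {}
--     lines = section.split("\n")
--     current_name = None
--     current_lines: list[str] = []
--
--     for line in lines:
--         if line.strip() == "[shader_globals]":
--             continue
--
--         # Check if this is a new uniform definition (Name={)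
--         if "={" in line and not line.startswith(" ") and not line.startswith("\t"):
--             # Save previous uniform if any
--             if current_name:
--                 uniforms[current_name] = "\n".join(current_lines)
--
--             # Start new uniform
--             name_part = line.split("={")[0]
--             current_name = name_part.strip()
--             current_lines = [line]
--         elif current_name:
--             current_lines.append(line)
--             # Check if uniform definition is complete (ends with })
--             if line.strip() == "}":
--                 uniforms[current_name] = "\n".join(current_lines)
--                 current_name = None
--                 current_lines = []
--
--     # Handle last uniform if not closed properly
--     if current_name:
--         uniforms[current_name] = "\n".join(current_lines)
--
--     return uniforms
-- ===== SOURCE B (Python) =====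
-- def _parse_shader_globals(section: str) -> dict[str, str]:
--     """Parse shader globals section into a dict of uniform_name -> full definition."""
--     uniforms: dict[str, str] = {}
--     lines = section.split("\n")
--     n = len(lines)
--     i = 0
--     while i < n:
--         line = lines[i]
--         if line.strip() == "[shader_globals]":
--             i += 1
--             continue
--         if "={" in line and not line.startswith((" ", "\t")):
--             name = line.split("={")[0].strip()
--             if not name:
--                 # A start line with an empty name opens no block.
--                 i += 1
--                 continue
--             block = [line]
--             j = i + 1
--             while j < n:
--                 inner = lines[j]
--                 if inner.strip() == "[shader_globals]":
--                     j += 1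
--                     continue
--                 if "={" in inner and not inner.startswith((" ", "\t")):
--                     break
--                 block.append(inner)
--                 j += 1
--                 if inner.strip() == "}":
--                     break
--             uniforms[name] = "\n".join(block)
--             i = j
--         else:
--             i += 1
--     return uniforms
-- ===== Notes on version B (the rewrite author's own statement) =====
-- stated objective: alternative
-- what changed: A is a single-pass state machine carrying (current_name, current_lines) across every line; B walks an outer line index and, at each uniform start, runs a dedicated inner scan that collects the whole block and hands back the resume position, with no cross-line parser state.
import Mathlib
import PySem

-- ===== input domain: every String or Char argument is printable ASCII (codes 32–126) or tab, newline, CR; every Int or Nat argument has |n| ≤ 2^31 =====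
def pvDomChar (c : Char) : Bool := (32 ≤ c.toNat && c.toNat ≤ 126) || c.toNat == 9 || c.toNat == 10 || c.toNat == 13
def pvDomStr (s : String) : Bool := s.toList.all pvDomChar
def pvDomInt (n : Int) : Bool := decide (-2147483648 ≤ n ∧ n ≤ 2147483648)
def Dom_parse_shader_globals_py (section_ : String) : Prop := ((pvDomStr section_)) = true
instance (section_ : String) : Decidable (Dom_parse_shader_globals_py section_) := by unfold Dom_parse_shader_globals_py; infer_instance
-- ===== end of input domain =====

-- B replaces A's single-pass state machine (dict, current_name, current_lines) by an outer index
-- walk that collects each uniform block with a dedicated inner scan; objective: alternative decomposition.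

-- ===== PORT A =====
-- Python truthiness of `current_name` (None and the empty string are falsy).
def pyA_truthy (cn : Option String) : Bool :=
  match cn with
  | some n => !(n == "")
  | none => false

-- one iteration of A's `for line in lines` loop over the state (uniforms, current_name, current_lines)
def pyA_step (st : PySem.Dict String String × Option String × List String) (line : String) :
    PySem.Dict String String × Option String × List String :=
  if PySem.Str.strip line == "[shader_globals]" then st
  else if PySem.Str.isIn "={" line && !(PySem.Str.startswith line " ")
          && !(PySem.Str.startswith line "\t") then
    -- save previous uniform if any, then start the new one
    let d := if pyA_truthy st.2.1 then
               st.1.insert (st.2.1.getD "") (PySem.Str.join "\n" st.2.2)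
             else st.1
    let name_part := (((PySem.Str.split? line "={").getD [])).headD ""
    (d, some (PySem.Str.strip name_part), [line])
  else if pyA_truthy st.2.1 then
    let cur := st.2.2 ++ [line]
    if PySem.Str.strip line == "}" then
      (st.1.insert (st.2.1.getD "") (PySem.Str.join "\n" cur), none, [])
    else (st.1, st.2.1, cur)
  else st

def parse_shader_globals_py (section_ : String) : List (String × String) :=
  let lines := ((PySem.Str.split? section_ "\n").getD [])
  let st := lines.foldl pyA_step (PySem.Dict.empty, none, [])
  -- handle last uniform if not closed properly
  let uniforms := if pyA_truthy st.2.1 then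
                    st.1.insert (st.2.1.getD "") (PySem.Str.join "\n" st.2.2)
                  else st.1
  uniforms.items

-- ===== PORT B =====
def pvB_isStart (line : String) : Bool :=
  PySem.Str.isIn "={" line && !(PySem.Str.startswith line " ")
    && !(PySem.Str.startswith line "\t")

def pvB_name (line : String) : String :=
  PySem.Str.strip ((((PySem.Str.split? line "={").getD [])).headD "")

-- B's inner while loop: collect the remainder of a block; returns (block, remaining lines)
def pvB_inner : List String → List String → List String × List String
  | [], block => (block, [])
  | l :: rest, block =>
    if PySem.Str.strip l == "[shader_globals]" then pvB_inner rest block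
    else if pvB_isStart l then (block, l :: rest)
    else if PySem.Str.strip l == "}" then (block ++ [l], rest)
    else pvB_inner rest (block ++ [l])

-- needed for pvB_outer's termination
theorem pvB_inner_len (lines block : List String) :
    (pvB_inner lines block).2.length ≤ lines.length := by
  induction lines generalizing block with
  | nil => simp [pvB_inner]
  | cons l rest ih =>
    simp only [pvB_inner]
    split_ifs <;> simp <;> exact le_trans (ih _) (Nat.le_succ _)

-- B's outer while loop over the line index
def pvB_outer : List String → PySem.Dict String String → PySem.Dict String String
  | [], d => d
  | l :: rest, d =>
    if PySem.Str.strip l == "[shader_globals]" then pvB_outer rest d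
    else if pvB_isStart l then
      if pvB_name l == "" then pvB_outer rest d
      else
        let p := pvB_inner rest [l]
        pvB_outer p.2 (d.insert (pvB_name l) (PySem.Str.join "\n" p.1))
    else pvB_outer rest d
termination_by lines _ => lines.length
decreasing_by
  · simp
  · simp
  · exact Nat.lt_succ_of_le (pvB_inner_len _ _)
  · simp

def parse_shader_globals_py_alt (section_ : String) : List (String × String) :=
  (pvB_outer (((PySem.Str.split? section_ "\n").getD [])) PySem.Dict.empty).items

-- ===== PRECONDITION & SPEC =====
def Spec_parse_shader_globals_py (section_ : String) (out : List (String × String)) : Prop := out = parse_shader_globals_py_alt section_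
instance (section_ : String) (out : List (String × String)) : Decidable (Spec_parse_shader_globals_py section_ out) := by unfold Spec_parse_shader_globals_py; infer_instance

-- ===== CLAIM (what is proved, stated in full; the proofs are below) =====
def Claim_equal_parse_shader_globals_py : Prop := ∀ (section_ : String), Dom_parse_shader_globals_py section_ → Spec_parse_shader_globals_py section_ (parse_shader_globals_py section_)

-- ===== LEMMAS AND PROOFS =====

-- A's final "save last uniform if the name is truthy" step
def pvFin (st : PySem.Dict String String × Option String × List String) :
    PySem.Dict String String :=
  if pyA_truthy st.2.1 then st.1.insert (st.2.1.getD "") (PySem.Str.join "\n" st.2.2) else st.1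

-- Joint loop invariant: from a falsy state A's fold equals B's outer walk (whatever junk is in
-- current_lines); from an open block (truthy name n, lines cur) A's fold equals B's inner scan
-- followed by the outer walk on the remaining lines.
theorem pv_main (lines : List String) :
    (∀ d cn cur, pyA_truthy cn = false →
        pvFin (lines.foldl pyA_step (d, cn, cur)) = pvB_outer lines d) ∧
    (∀ d n cur, (n == "") = false →
        pvFin (lines.foldl pyA_step (d, some n, cur))
          = pvB_outer (pvB_inner lines cur).2
              (d.insert n (PySem.Str.join "\n" (pvB_inner lines cur).1))) := by
  induction lines with
  | nil =>
    refine ⟨fun d cn cur hcn => ?_, fun d n cur hn => ?_⟩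
    · simp [pvFin, hcn, pvB_outer]
    · simp [pvFin, pyA_truthy, pvB_inner, pvB_outer, hn]
  | cons l rest ih =>
    refine ⟨fun d cn cur hcn => ?_, fun d n cur hn => ?_⟩
    · by_cases hhdr : (PySem.Str.strip l == "[shader_globals]") = true
      · rw [List.foldl_cons, pyA_step, if_pos hhdr, pvB_outer, if_pos hhdr]
        exact ih.1 d cn cur hcn
      · by_cases hs : pvB_isStart l = true
        · have hs' := hs; unfold pvB_isStart at hs'
          rw [List.foldl_cons, pyA_step, if_neg hhdr, if_pos hs', pvB_outer,
              if_neg hhdr, if_pos hs]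
          simp only [hcn, if_neg, Bool.false_eq_true, not_false_eq_true, if_neg]
          by_cases hname : (pvB_name l == "") = true
          · rw [if_pos hname]
            have : PySem.Str.strip ((((PySem.Str.split? l "={").getD [])).headD "") = "" := by
              have := of_decide_eq_true (by simpa [pvB_name] using hname)
              simpa [pvB_name] using this
            rw [List.headD_eq_head?_getD] at this
            exact ih.1 d _ [l] (by simp [pyA_truthy, this])
          · rw [if_neg hname]
            exact ih.2 d (pvB_name l) [l] (by simpa using hname)
        · rw [List.foldl_cons, pyA_step, if_neg hhdr]
          unfold pvB_isStart at hs
          rw [if_neg hs, if_neg (by simp [hcn]), pvB_outer, if_neg hhdr, if_neg (by exact hs)]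
          exact ih.1 d cn cur hcn
    · have htr : pyA_truthy (some n) = true := by simp [pyA_truthy, hn]
      by_cases hhdr : (PySem.Str.strip l == "[shader_globals]") = true
      · rw [List.foldl_cons, pyA_step, if_pos hhdr]
        rw [show pvB_inner (l :: rest) cur = pvB_inner rest cur by
              rw [pvB_inner, if_pos hhdr]]
        exact ih.2 d n cur hn
      · by_cases hs : pvB_isStart l = true
        · have hs' := hs; unfold pvB_isStart at hs'
          rw [List.foldl_cons, pyA_step, if_neg hhdr, if_pos hs']
          simp only [htr, if_pos]
          rw [show pvB_inner (l :: rest) cur = (cur, l :: rest) by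
                rw [pvB_inner, if_neg hhdr, if_pos hs]]
          simp only
          rw [pvB_outer, if_neg hhdr, if_pos hs]
          by_cases hname : (pvB_name l == "") = true
          · rw [if_pos hname]
            have hzero : PySem.Str.strip ((((PySem.Str.split? l "={").getD [])).headD "") = "" := by
              have := of_decide_eq_true (by simpa [pvB_name] using hname)
              simpa [pvB_name] using this
            rw [List.headD_eq_head?_getD] at hzero
            simpa using ih.1 (d.insert n (PySem.Str.join "\n" cur)) _ [l]
              (by simp [pyA_truthy, hzero])
          · rw [if_neg hname]
            simpa [pvB_name] using
              ih.2 (d.insert n (PySem.Str.join "\n" cur)) (pvB_name l) [l] (by simpa using hname)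
        · have hs' := hs; unfold pvB_isStart at hs'
          rw [List.foldl_cons, pyA_step, if_neg hhdr, if_neg hs', if_pos htr]
          rw [show pvB_inner (l :: rest) cur
                = if (PySem.Str.strip l == "}") = true then (cur ++ [l], rest)
                  else pvB_inner rest (cur ++ [l]) by
                rw [pvB_inner, if_neg hhdr, if_neg hs]]
          by_cases hclose : (PySem.Str.strip l == "}") = true
          · rw [if_pos hclose, if_pos hclose]
            simpa using ih.1 (d.insert n (PySem.Str.join "\n" (cur ++ [l]))) none []
              (by simp [pyA_truthy])
          · rw [if_neg hclose, if_neg hclose]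
            exact ih.2 d n (cur ++ [l]) hn

-- ===== VERDICT (by name: the statement is the Claim_ definition above) =====
theorem parse_shader_globals_py_spec : Claim_equal_parse_shader_globals_py := by
  intro section_ _
  show parse_shader_globals_py section_ = parse_shader_globals_py_alt section_
  unfold parse_shader_globals_py parse_shader_globals_py_alt
  have := (pv_main (((PySem.Str.split? section_ "\n").getD []))).1 PySem.Dict.empty none [] rfl
  simpa [pvFin, pyA_truthy] using congrArg PySem.Dict.items this
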